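-- pv_equiv track=rewrite | github.com/eggzotic/Hackerrank | DayOfTheProgrammer/DayOfTheProgrammer.py | dayOfProgrammer
-- ===== SOURCE A (Python) =====
-- def dayOfProgrammer(year):
--     dop = 256
--     day = 0
--     finalMonth = 0
--     for month in range(1,12+1):
--         daysOfMonth = daysForMonth(year,month)
--         if day + daysOfMonth < dop:
--             day += daysOfMonth
--         else:
--             finalMonth = month
--             break
--     dom = dop - day
--     return f'{str(dom).zfill(2)}.{str(finalMonth).zfill(2)}.{year}'
--
-- def daysForMonth(year, month):
--     # Jan
--     if month == 1: return 31
--     # Feb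
--     if month == 2:
--         if year < 1917:
--             if year % 4 == 0:
--                 return 29
--             return 28
--         if year == 1918:
--             return 15
--         if year % 400 == 0: return 29
--         if year % 100 == 0: return 28
--         if year % 4 == 0: return 29
--         return 28
--     # Mar
--     if month in [3, 5, 7, 8, 10, 12]: return 31
--     return 30
-- ===== SOURCE B (Python) =====
-- def dayOfProgrammer(year):
--     # The 256th day always falls in September: day = 256 - (215 + feb_days) = 41 - feb_days.
--     if year == 1918:
--         day = 26  # Feb 1918 had 15 days (Julian -> Gregorian switch)
--     else:
--         if year < 1917:
--             leap = year % 4 == 0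
--         else:
--             leap = year % 400 == 0 or (year % 100 != 0 and year % 4 == 0)
--         day = 12 if leap else 13
--     return f'{day}.09.{year}'
-- ===== Notes on version B (the rewrite author's own statement) =====
-- stated objective: simpler
-- what changed: Replaced the month-by-month accumulation loop with a closed form: the 256th day always lands in September, so B computes only a leap flag (Julian before 1917, Gregorian after, day 26 for 1918) and formats the answer directly.
import Mathlib
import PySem

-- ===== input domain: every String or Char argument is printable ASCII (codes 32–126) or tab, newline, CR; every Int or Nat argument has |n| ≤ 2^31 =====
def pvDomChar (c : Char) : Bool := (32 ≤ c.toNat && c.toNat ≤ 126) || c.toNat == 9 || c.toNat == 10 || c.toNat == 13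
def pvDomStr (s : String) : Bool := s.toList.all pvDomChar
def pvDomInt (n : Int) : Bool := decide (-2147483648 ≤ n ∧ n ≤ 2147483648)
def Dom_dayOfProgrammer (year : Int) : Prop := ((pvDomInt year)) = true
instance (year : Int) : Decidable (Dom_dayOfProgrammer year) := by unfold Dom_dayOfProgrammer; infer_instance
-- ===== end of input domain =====

-- B replaces A's month-accumulating loop by a closed form: the 256th day is always in
-- September, so only February's length (a leap flag plus the 1918 special case) matters. Objective: simpler.

-- ===== PORT A =====
def daysForMonth (year month : Int) : Int :=
  if month == 1 then 31
  else if month == 2 then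
    if year < 1917 then (if PySem.Int.mod year 4 == 0 then 29 else 28)
    else if year == 1918 then 15
    else if PySem.Int.mod year 400 == 0 then 29
    else if PySem.Int.mod year 100 == 0 then 28
    else if PySem.Int.mod year 4 == 0 then 29
    else 28
  else if month ∈ [(3:Int), 5, 7, 8, 10, 12] then 31
  else 30

-- the 'for month in range(1,13)' loop with its break: returns (day, finalMonth)
def dayLoop (year : Int) : List Int → Int → Int × Int
  | [], day => (day, 0)
  | m :: ms, day =>
    let d := daysForMonth year m
    if day + d < 256 then dayLoop year ms (day + d) else (day, m)

def dayOfProgrammer (year : Int) : String :=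
  let r := dayLoop year (PySem.List.pyRange 1 13 1) 0
  let dom := 256 - r.1
  PySem.Str.zfill (PySem.Int.toStr dom) 2 ++ "." ++ PySem.Str.zfill (PySem.Int.toStr r.2) 2 ++ "." ++ PySem.Int.toStr year

-- ===== PORT B =====
def dayOfProgrammer_alt (year : Int) : String :=
  let day : Int :=
    if year == 1918 then 26
    else
      let leap := if year < 1917 then PySem.Int.mod year 4 == 0
                  else PySem.Int.mod year 400 == 0 || (PySem.Int.mod year 100 != 0 && PySem.Int.mod year 4 == 0)
      if leap then 12 else 13
  PySem.Int.toStr day ++ ".09." ++ PySem.Int.toStr year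

-- ===== PRECONDITION & SPEC =====
def Spec_dayOfProgrammer (year : Int) (out : String) : Prop := out = dayOfProgrammer_alt year
instance (year : Int) (out : String) : Decidable (Spec_dayOfProgrammer year out) := by unfold Spec_dayOfProgrammer; infer_instance

-- ===== CLAIM (what is proved, stated in full; the proofs are below) =====
def Claim_equal_dayOfProgrammer : Prop := ∀ (year : Int), Dom_dayOfProgrammer year → Spec_dayOfProgrammer year (dayOfProgrammer year)

-- ===== LEMMAS AND PROOFS =====
lemma feb_cases (year : Int) :
    daysForMonth year 2 = 15 ∨ daysForMonth year 2 = 28 ∨ daysForMonth year 2 = 29 := by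
  unfold daysForMonth; split_ifs <;> simp_all

lemma loop_eval (year : Int) :
    dayLoop year (PySem.List.pyRange 1 13 1) 0 = (215 + daysForMonth year 2, 9) := by
  have h : PySem.List.pyRange 1 13 1 = [1,2,3,4,5,6,7,8,9,10,11,12] := by decide
  have d1 : daysForMonth year 1 = 31 := by simp [daysForMonth]
  have d3 : daysForMonth year 3 = 31 := by simp [daysForMonth]
  have d4 : daysForMonth year 4 = 30 := by simp [daysForMonth]
  have d5 : daysForMonth year 5 = 31 := by simp [daysForMonth]
  have d6 : daysForMonth year 6 = 30 := by simp [daysForMonth]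
  have d7 : daysForMonth year 7 = 31 := by simp [daysForMonth]
  have d8 : daysForMonth year 8 = 31 := by simp [daysForMonth]
  have d9 : daysForMonth year 9 = 30 := by simp [daysForMonth]
  rcases feb_cases year with hf | hf | hf <;>
    simp only [h, dayLoop, d1, d3, d4, d5, d6, d7, d8, d9, hf] <;> norm_num

-- ===== VERDICT (by name: the statement is the Claim_ definition above) =====
theorem dayOfProgrammer_spec : Claim_equal_dayOfProgrammer := by
  intro year _
  show dayOfProgrammer year = dayOfProgrammer_alt year
  unfold dayOfProgrammer dayOfProgrammer_alt
  rw [loop_eval]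
  by_cases h18 : year = 1918
  · subst h18; decide
  · have hne : ¬ daysForMonth year 2 = 15 := by
      unfold daysForMonth
      split_ifs <;> simp_all
    unfold daysForMonth at *
    split_ifs at * <;> simp_all <;> decide
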